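-- pv_equiv track=rewrite | github.com/uri0l/butterfly-cpg-hmm | ZW28_comparison(cpg_vs_non)(10_).py | detect_cpg_islands
-- ===== SOURCE A (Python) =====
-- def detect_cpg_islands(sequence, window_size):
--     cpg_count = 0
--     non_cpg_count = 0
--
--     for i in range(0, len(sequence), window_size):
--         window = sequence[i:i+window_size]
--         cg_count = window.count("CG")
--         if cg_count >= window_size // 10:  # 10% threshold
--             cpg_count += 1
--         else:
--             non_cpg_count += 1
--
--     return cpg_count, non_cpg_count
-- ===== SOURCE B (Python) =====
-- def detect_cpg_islands(sequence, window_size):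
--     n = len(sequence)
--     # prefix[k] = number of CG dinucleotide starts at positions < k
--     prefix = [0]
--     total = 0
--     for i in range(n - 1):
--         if sequence[i] == 'C' and sequence[i + 1] == 'G':
--             total += 1
--         prefix.append(total)
--     threshold = window_size // 10
--     cpg = 0
--     non_cpg = 0
--     for s in range(0, n, window_size):
--         e = min(s + window_size, n)
--         cg = prefix[e - 1] - prefix[s]
--         if cg >= threshold:
--             cpg += 1
--         else:
--             non_cpg += 1
--     return cpg, non_cpg
-- ===== Notes on version B (the rewrite author's own statement) =====
-- stated objective: alternative
-- what changed: B builds a cumulative prefix table of CG-dinucleotide starts in one pass and computes each window's CG count as a difference of two table entries, instead of slicing each window out and re-scanning it with str.count.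
import Mathlib
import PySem

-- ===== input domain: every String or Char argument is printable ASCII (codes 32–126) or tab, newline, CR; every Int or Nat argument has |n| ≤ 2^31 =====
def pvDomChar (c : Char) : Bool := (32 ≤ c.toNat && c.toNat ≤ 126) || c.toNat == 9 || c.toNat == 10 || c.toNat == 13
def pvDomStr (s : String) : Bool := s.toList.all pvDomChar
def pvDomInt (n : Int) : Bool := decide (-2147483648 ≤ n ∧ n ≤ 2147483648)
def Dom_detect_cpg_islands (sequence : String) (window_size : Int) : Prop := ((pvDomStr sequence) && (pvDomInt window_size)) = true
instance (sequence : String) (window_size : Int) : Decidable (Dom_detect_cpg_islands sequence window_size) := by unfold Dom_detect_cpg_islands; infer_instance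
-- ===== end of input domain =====

-- B replaces A's per-window slice-and-str.count scan by a prefix table of CG-dinucleotide
-- starts built in one pass, reading each window's CG count as a difference of two entries
-- (objective: alternative algorithm, same O(n) cost).

-- ===== PORT A =====
def detect_cpg_islands (sequence : String) (window_size : Int) : Int × Int :=
  let cs := sequence.toList
  (PySem.List.pyRange 0 (cs.length : Int) window_size).foldl
    (fun (acc : Int × Int) i =>
      let window := PySem.List.slice cs (some i) (some (i + window_size))
      let cg : Int := (PySem.Chars.count window ['C', 'G'] : Int)
      if PySem.Int.floordiv window_size 10 ≤ cg then (acc.1 + 1, acc.2)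
      else (acc.1, acc.2 + 1))
    (0, 0)

-- ===== PORT B =====
def detect_cpg_islands_alt (sequence : String) (window_size : Int) : Int × Int :=
  let cs := sequence.toList
  let n : Int := (cs.length : Int)
  -- prefix[k] = number of CG dinucleotide starts at positions < k (built with a running total)
  let pt := (PySem.List.pyRange 0 (n - 1) 1).foldl
    (fun (acc : List Int × Int) i =>
      let t := if PySem.List.pyGetD cs i ' ' = 'C' ∧ PySem.List.pyGetD cs (i + 1) ' ' = 'G'
               then acc.2 + 1 else acc.2
      (acc.1 ++ [t], t))
    ([0], 0)
  let prefixTable := pt.1  -- Source B's `prefix` (renamed: `prefix` is a Lean keyword)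
  let threshold := PySem.Int.floordiv window_size 10
  (PySem.List.pyRange 0 n window_size).foldl
    (fun (acc : Int × Int) s =>
      let e := min (s + window_size) n
      let cg := PySem.List.pyGetD prefixTable (e - 1) 0 - PySem.List.pyGetD prefixTable s 0
      if threshold ≤ cg then (acc.1 + 1, acc.2)
      else (acc.1, acc.2 + 1))
    (0, 0)

-- ===== PRECONDITION & SPEC =====
-- Pre_ excludes only window_size = 0, where Python's range(0, len, 0) raises ValueError (in both A and B).
def Pre_detect_cpg_islands (sequence : String) (window_size : Int) : Prop := window_size ≠ 0
instance (sequence : String) (window_size : Int) : Decidable (Pre_detect_cpg_islands sequence window_size) := by unfold Pre_detect_cpg_islands; infer_instance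
def pvWitness_detect_cpg_islands : String × Int := ("ACGTCGCG", 4)

def Spec_detect_cpg_islands (sequence : String) (window_size : Int) (out : Int × Int) : Prop := out = detect_cpg_islands_alt sequence window_size
instance (sequence : String) (window_size : Int) (out : Int × Int) : Decidable (Spec_detect_cpg_islands sequence window_size out) := by unfold Spec_detect_cpg_islands; infer_instance

-- ===== CLAIM (what is proved, stated in full; the proofs are below) =====
def Claim_equal_detect_cpg_islands : Prop := ∀ (sequence : String) (window_size : Int), Dom_detect_cpg_islands sequence window_size → Pre_detect_cpg_islands sequence window_size → Spec_detect_cpg_islands sequence window_size (detect_cpg_islands sequence window_size)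

-- ===== LEMMAS AND PROOFS =====

-- number of CG dinucleotide starts in a character list
def pvPC : List Char → Nat
  | a :: b :: t => (if a = 'C' ∧ b = 'G' then 1 else 0) + pvPC (b :: t)
  | _ => 0

lemma pvPC_cons (a : Char) (l : List Char) :
    pvPC (a :: l) = (if a = 'C' ∧ l.head? = some 'G' then 1 else 0) + pvPC l := by
  cases l with
  | nil => simp [pvPC]
  | cons b t => simp [pvPC]

lemma pvPC_take_one (cs : List Char) : pvPC (cs.take 1) = 0 := by
  cases cs <;> rfl

lemma pvPC_single (a : Char) : pvPC [a] = 0 := rfl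

lemma pvGo_nil (fuel acc : Nat) : PySem.Chars.count.go ['C', 'G'] fuel [] acc = acc := by
  cases fuel <;> simp [PySem.Chars.count.go]

lemma pvGo_pc (fuel : Nat) : ∀ (l : List Char) (acc : Nat), l.length ≤ fuel →
    PySem.Chars.count.go ['C', 'G'] fuel l acc = acc + pvPC l := by
  induction fuel with
  | zero =>
    intro l acc h
    have : l = [] := by cases l with | nil => rfl | cons a t => simp at h
    subst this; simp [PySem.Chars.count.go, pvPC]
  | succ fuel ih =>
    intro l acc h
    cases l with
    | nil => rw [pvGo_nil]; simp [pvPC]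
    | cons a t =>
      cases t with
      | nil =>
        have hpref : List.isPrefixOf ['C', 'G'] [a] = false := by
          simp [List.isPrefixOf]
        simp only [PySem.Chars.count.go, hpref, Bool.false_eq_true, if_false]
        rw [pvGo_nil]; simp [pvPC]
      | cons b t' =>
        by_cases hp : a = 'C' ∧ b = 'G'
        · obtain ⟨ha, hb⟩ := hp
          subst ha; subst hb
          have hpref : List.isPrefixOf ['C', 'G'] ('C' :: 'G' :: t') = true := by
            simp [List.isPrefixOf]
          have hlen : t'.length ≤ fuel := by simp at h; omega
          simp only [PySem.Chars.count.go, hpref, if_true]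
          have hdrop : List.drop (['C', 'G'].length) ('C' :: 'G' :: t') = t' := rfl
          rw [hdrop, ih _ _ hlen, pvPC_cons, pvPC_cons]
          simp; omega
        · have hpref : List.isPrefixOf ['C', 'G'] (a :: b :: t') = false := by
            simp only [List.isPrefixOf, Bool.and_true]
            simp only [Bool.and_eq_false_iff, beq_eq_false_iff_ne, ne_eq]
            by_cases ha : a = 'C'
            · right; intro hb; exact hp ⟨ha, hb.symm⟩
            · left; intro hc; exact ha hc.symm
          have hlen : (b :: t').length ≤ fuel := by simp at h ⊢; omega
          simp only [PySem.Chars.count.go, hpref, Bool.false_eq_true, if_false]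
          rw [ih _ _ hlen, pvPC_cons a (b :: t')]
          have hc : ¬ (a = 'C' ∧ (b :: t').head?  = some 'G') := by simpa using hp
          rw [if_neg hc]
          omega

lemma pvCount_eq_pvPC (l : List Char) : PySem.Chars.count l ['C', 'G'] = pvPC l := by
  have : PySem.Chars.count l ['C', 'G'] = PySem.Chars.count.go ['C', 'G'] l.length l 0 := by
    simp [PySem.Chars.count]
  rw [this, pvGo_pc l.length l 0 le_rfl]; omega

lemma pvPC_take_succ (cs : List Char) (m : Nat) :
    pvPC (cs.take (m + 2)) = pvPC (cs.take (m + 1)) +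
      (if cs.getD m ' ' = 'C' ∧ cs.getD (m + 1) ' ' = 'G' then 1 else 0) := by
  induction cs generalizing m with
  | nil => simp [pvPC]
  | cons a t ih =>
    cases m with
    | zero =>
      cases t with
      | nil => simp [pvPC]
      | cons b t' =>
        simp [List.take_succ_cons, pvPC_cons]
        omega
    | succ m' =>
      rw [show m' + 1 + 2 = (m' + 2) + 1 from rfl, show m' + 1 + 1 = (m' + 1) + 1 from rfl]
      rw [List.take_succ_cons, List.take_succ_cons, pvPC_cons, pvPC_cons]
      have hh : (t.take (m' + 2)).head? = (t.take (m' + 1)).head? := by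
        rw [List.head?_take, List.head?_take]; simp
      rw [hh, ih m']
      simp
      omega

lemma pvPC_drop_take (cs : List Char) : ∀ (s w : Nat), 1 ≤ w →
    pvPC ((cs.drop s).take w) + pvPC (cs.take (s + 1)) = pvPC (cs.take (s + w)) := by
  induction cs with
  | nil => intro s w _; simp [pvPC]
  | cons a t ih =>
    intro s w hw
    cases s with
    | zero => simp [pvPC_single]
    | succ s' =>
      rw [List.drop_succ_cons, show s' + 1 + 1 = (s' + 1) + 1 from rfl,
          show s' + 1 + w = (s' + w) + 1 by omega,
          List.take_succ_cons, List.take_succ_cons, pvPC_cons, pvPC_cons]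
      have hh : (t.take (s' + 1)).head? = (t.take (s' + w)).head? := by
        rw [List.head?_take, List.head?_take]
        simp; omega
      rw [hh]
      have := ih s' w hw
      omega

-- the Nat-indexed step of B's prefix-building loop
def pvStep (cs : List Char) (acc : List Int × Int) (k : Nat) : List Int × Int :=
  let t := if cs.getD k ' ' = 'C' ∧ cs.getD (k + 1) ' ' = 'G' then acc.2 + 1 else acc.2
  (acc.1 ++ [t], t)

lemma pvPrefix_inv (cs : List Char) (m : Nat) :
    (List.range m).foldl (pvStep cs) ([0], 0)
      = ((List.range (m + 1)).map (fun k => (pvPC (cs.take (k + 1)) : Int)),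
         (pvPC (cs.take (m + 1)) : Int)) := by
  induction m with
  | zero => simp [pvPC_take_one]
  | succ m ih =>
    rw [List.range_succ, List.foldl_append, ih]
    have ht : (if cs.getD m ' ' = 'C' ∧ cs.getD (m + 1) ' ' = 'G'
                then (pvPC (cs.take (m + 1)) : Int) + 1 else (pvPC (cs.take (m + 1)) : Int))
              = (pvPC (cs.take (m + 2)) : Int) := by
      rw [pvPC_take_succ cs m]
      split_ifs <;> push_cast <;> ring
    simp only [List.foldl_cons, List.foldl_nil, pvStep, ht]
    rw [show (List.range (m + 1 + 1)) = List.range (m + 1) ++ [m + 1] from List.range_succ]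
    simp

lemma pvB_prefix (cs : List Char) :
    ((PySem.List.pyRange 0 ((cs.length : Int) - 1) 1).foldl
      (fun (acc : List Int × Int) i =>
        let t := if PySem.List.pyGetD cs i ' ' = 'C' ∧ PySem.List.pyGetD cs (i + 1) ' ' = 'G'
                 then acc.2 + 1 else acc.2
        (acc.1 ++ [t], t))
      ([0], 0)).1
    = (List.range (max cs.length 1)).map (fun k => (pvPC (cs.take (k + 1)) : Int)) := by
  rw [PySem.List.pyRange_one, List.foldl_map]
  have h1 : (((cs.length : Int) - 1) - 0).toNat = cs.length - 1 := by omega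
  rw [h1]
  have h2 : ∀ (acc : List Int × Int), ∀ k ∈ List.range (cs.length - 1),
      (fun (acc : List Int × Int) (k : Nat) =>
        (fun (acc : List Int × Int) (i : Int) =>
          let t := if PySem.List.pyGetD cs i ' ' = 'C' ∧ PySem.List.pyGetD cs (i + 1) ' ' = 'G'
                   then acc.2 + 1 else acc.2
          (acc.1 ++ [t], t)) acc ((0 : Int) + (k : Int))) acc k = pvStep cs acc k := by
    intro acc k _
    simp only [pvStep, zero_add]
    have e1 : PySem.List.pyGetD cs (k : Int) ' ' = cs.getD k ' ' := by
      simp [PySem.List.pyGetD_natCast]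
    have e2 : PySem.List.pyGetD cs ((k : Int) + 1) ' ' = cs.getD (k + 1) ' ' := by
      rw [show ((k : Int) + 1) = ((k + 1 : Nat) : Int) by push_cast; ring,
          PySem.List.pyGetD_natCast]
    rw [e1, e2]
  rw [PySem.List.foldl_congr_mem _ _ _ _ h2, pvPrefix_inv]
  have : cs.length - 1 + 1 = max cs.length 1 := by omega
  rw [this]

lemma pvPyRange_neg_nil (n : Nat) (ws : Int) (h : ws < 0) :
    PySem.List.pyRange 0 (n : Int) ws = [] := by
  simp only [PySem.List.pyRange]
  split_ifs <;> first | rfl | omega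

lemma pvWindow_count (cs : List Char) (ws s : Int) (hw : 0 < ws) (h0 : 0 ≤ s)
    (hs : s < (cs.length : Int)) :
    ((PySem.Chars.count (PySem.List.slice cs (some s) (some (s + ws))) ['C', 'G'] : Nat) : Int)
    = PySem.List.pyGetD ((List.range (max cs.length 1)).map (fun k => (pvPC (cs.take (k + 1)) : Int)))
        (min (s + ws) (cs.length : Int) - 1) 0
      - PySem.List.pyGetD ((List.range (max cs.length 1)).map (fun k => (pvPC (cs.take (k + 1)) : Int)))
        s 0 := by
  have hn : 1 ≤ cs.length := by omega
  have hmax : max cs.length 1 = cs.length := by omega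
  rw [hmax]
  set n := cs.length with hn_def
  set e : Int := min (s + ws) (n : Int) with he_def
  have he1 : s + 1 ≤ e := by omega
  have he2 : e ≤ (n : Int) := by omega
  -- evaluate the two table reads
  have hlen : ((List.range n).map (fun k => (pvPC (cs.take (k + 1)) : Int))).length = n := by simp
  have hr1 : PySem.List.pyGetD ((List.range n).map (fun k => (pvPC (cs.take (k + 1)) : Int))) s 0
      = (pvPC (cs.take (s.toNat + 1)) : Int) := by
    rw [PySem.List.pyGetD_eq_getElem _ _ h0 (by rw [hlen]; exact hs)]
    simp
  have hr2 : PySem.List.pyGetD ((List.range n).map (fun k => (pvPC (cs.take (k + 1)) : Int))) (e - 1) 0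
      = (pvPC (cs.take e.toNat) : Int) := by
    rw [PySem.List.pyGetD_eq_getElem _ _ (by omega) (by rw [hlen]; omega)]
    simp only [List.getElem_map, List.getElem_range]
    have hidx : (e - 1).toNat + 1 = e.toNat := by omega
    rw [hidx]
  rw [hr1, hr2]
  -- evaluate the slice and its count
  rw [PySem.List.slice_toNat cs h0 (by omega)]
  have hws : (s + ws).toNat - s.toNat = ws.toNat := by omega
  rw [hws, pvCount_eq_pvPC]
  have hmain := pvPC_drop_take cs s.toNat ws.toNat (by omega)
  have htake : cs.take (s.toNat + ws.toNat) = cs.take e.toNat := by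
    rcases le_total (s + ws) (n : Int) with h | h
    · congr 1; omega
    · have h1 : e.toNat = n := by omega
      have h2 : n ≤ s.toNat + ws.toNat := by omega
      rw [h1, List.take_of_length_le h2, List.take_of_length_le (le_refl n)]
  rw [htake] at hmain
  omega

-- ===== VERDICT (by name: the statement is the Claim_ definition above) =====
theorem detect_cpg_islands_spec : Claim_equal_detect_cpg_islands := by
  intro sequence window_size _hdom hpre
  unfold Spec_detect_cpg_islands detect_cpg_islands detect_cpg_islands_alt
  simp only []
  rcases lt_trichotomy window_size 0 with hw | hw | hw
  · rw [pvPyRange_neg_nil sequence.toList.length window_size hw]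
    rfl
  · exact absurd hw hpre
  · rw [pvB_prefix sequence.toList]
    apply PySem.List.foldl_congr_mem
    intro acc s hsmem
    rw [PySem.List.mem_pyRange_iff_of_pos hw] at hsmem
    obtain ⟨h0, hs, -⟩ := hsmem
    rw [pvWindow_count sequence.toList window_size s hw h0 hs]
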